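-- pv_equiv track=rewrite | github.com/Koprivnica/Codewars | 7kyu/how_many_urinals_are_free.py | free_urinals
-- ===== SOURCE A (Python) =====
-- def free_urinals(urinals):
--     counter = 0
--     urinals = "0" + urinals + "0"
--     if "11" in urinals:
--         return -1
--     for i in range(1, len(urinals)-1):
--         if urinals[i-1:i+2] == "000":
--             urinals = urinals[:i] + "1" + urinals[i+1:]
--             counter += 1
--     return counter
-- ===== SOURCE B (Python) =====
-- def free_urinals(urinals):
--     # Run-length formulation: with a virtual free seat padded at each end, every
--     # maximal run of k consecutive free seats admits exactly (k - 1) // 2 people;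
--     # sum that closed form over the runs instead of simulating placements.
--     if "11" in urinals:
--         return -1
--     total = 0
--     run = 1  # virtual free seat on the left edge
--     for c in urinals + "0":  # virtual free seat on the right edge
--         if c == "0":
--             run += 1
--         else:
--             if run:
--                 total += (run - 1) // 2
--             run = 0
--     return total + (run - 1) // 2
-- ===== Notes on version B (the rewrite author's own statement) =====
-- stated objective: faster
-- what changed: Replaces A's greedy simulation (re-slicing and rebuilding the whole string at every placement while testing '000' windows) with a run-length computation: measure each maximal run of k free seats once and add the closed form (k-1)//2 per run, so nothing is ever placed or rebuilt.
import Mathlib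
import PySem

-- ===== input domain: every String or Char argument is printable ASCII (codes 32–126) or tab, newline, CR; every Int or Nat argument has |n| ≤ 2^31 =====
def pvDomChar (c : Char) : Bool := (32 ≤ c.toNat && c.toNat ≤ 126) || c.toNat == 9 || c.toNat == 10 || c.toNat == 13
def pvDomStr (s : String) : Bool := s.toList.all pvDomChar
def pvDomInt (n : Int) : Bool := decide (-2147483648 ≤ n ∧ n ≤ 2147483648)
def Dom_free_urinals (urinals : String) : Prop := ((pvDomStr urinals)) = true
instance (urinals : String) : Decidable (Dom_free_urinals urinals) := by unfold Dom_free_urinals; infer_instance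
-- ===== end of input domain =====

-- B replaces A's O(n^2) greedy simulation with an O(n) run-length closed form (k-1)//2 per free run.

-- ===== PORT A =====
def free_urinals (urinals : String) : Int :=
  -- urinals = "0" + urinals + "0" (the rebound variable, inlined)
  if PySem.Chars.isIn ['1', '1'] (('0' :: urinals.toList) ++ ['0']) then -1
  else
    ((PySem.List.pyRange 1 (((('0' :: urinals.toList) ++ ['0']).length : Int) - 1) 1).foldl
      (fun (st : List Char × Int) i =>
        if PySem.List.slice st.1 (some (i - 1)) (some (i + 2)) = ['0', '0', '0'] then
          (PySem.List.slice st.1 none (some i) ++ ['1'] ++ PySem.List.slice st.1 (some (i + 1)) none,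
           st.2 + 1)
        else st)
      (('0' :: urinals.toList) ++ ['0'], 0)).2

-- ===== PORT B =====
def free_urinals_alt (urinals : String) : Int :=
  if PySem.Chars.isIn ['1', '1'] urinals.toList then -1
  else
    let fin := (urinals.toList ++ ['0']).foldl
      (fun (st : Int × Int) c =>
        if c = '0' then (st.1, st.2 + 1)
        else ((if st.2 ≠ 0 then st.1 + PySem.Int.floordiv (st.2 - 1) 2 else st.1), 0))
      (0, 1)
    fin.1 + PySem.Int.floordiv (fin.2 - 1) 2

-- ===== PRECONDITION & SPEC =====
def Spec_free_urinals (urinals : String) (out : Int) : Prop := out = free_urinals_alt urinals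
instance (urinals : String) (out : Int) : Decidable (Spec_free_urinals urinals out) := by unfold Spec_free_urinals; infer_instance

-- ===== CLAIM (what is proved, stated in full; the proofs are below) =====
def Claim_equal_free_urinals : Prop := ∀ (urinals : String), Dom_free_urinals urinals → Spec_free_urinals urinals (free_urinals urinals)

-- ===== LEMMAS AND PROOFS =====

-- abstract greedy pass (A's semantics): p is the effective previous seat
def pvGo : Char → List Char → Int
  | _, [] => 0
  | p, c :: rest =>
      if p = '0' ∧ c = '0' ∧ rest.headD '0' = '0' then 1 + pvGo '1' rest else pvGo c rest

lemma pvGo_cons (p c : Char) (rest : List Char) :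
    pvGo p (c :: rest) =
      if p = '0' ∧ c = '0' ∧ rest.headD '0' = '0' then 1 + pvGo '1' rest else pvGo c rest := rfl

-- run-length spec (B's semantics): r = length of the current free run so far
def pvRuns : List Char → Nat → Int
  | [], r => ((r / 2 : Nat) : Int)
  | c :: rest, r =>
      if c = '0' then pvRuns rest (r + 1) else (((r - 1) / 2 : Nat) : Int) + pvRuns rest 0

-- "11" occurs in the 0-padded string iff it occurs in the original
lemma pvIsIn_cons (l : List Char) : (['1', '1'] <:+: ('0' :: l)) ↔ (['1', '1'] <:+: l) := by
  rw [List.infix_cons_iff]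
  constructor
  · rintro (h | h)
    · rcases h with ⟨t, ht⟩; simp at ht
    · exact h
  · exact Or.inr

lemma pvInf_snoc (l : List Char) : (['1', '1'] <:+: (l ++ ['0'])) ↔ (['1', '1'] <:+: l) := by
  constructor
  · intro h
    have h' : (['1', '1'] : List Char).reverse <:+: (l ++ ['0']).reverse := List.reverse_infix.2 h
    simp only [List.reverse_append] at h'
    have h'' := (pvIsIn_cons l.reverse).1 (by simpa using h')
    exact List.reverse_infix.1 (by simpa using h'')
  · intro h
    exact h.trans (List.prefix_append l ['0']).isInfix

lemma pvIsIn_pad (l : List Char) :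
    PySem.Chars.isIn ['1', '1'] (('0' :: l) ++ ['0']) = PySem.Chars.isIn ['1', '1'] l := by
  have hiff : (['1', '1'] <:+: (('0' :: l) ++ ['0'])) ↔ (['1', '1'] <:+: l) := by
    rw [show ('0' :: l) ++ ['0'] = '0' :: (l ++ ['0']) from rfl]
    exact (pvIsIn_cons _).trans (pvInf_snoc l)
  by_cases hb : ['1', '1'] <:+: l
  · rw [(PySem.Chars.isIn_iff_infix _ _).2 hb, (PySem.Chars.isIn_iff_infix _ _).2 (hiff.2 hb)]
  · rw [(PySem.Chars.isIn_eq_false_iff _ _).2 hb,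
      (PySem.Chars.isIn_eq_false_iff _ _).2 (fun hc => hb (hiff.1 hc))]

-- pvGo ignores the previous seat when it is occupied
lemma pvGo_prev_ne (c c' : Char) (l : List Char) (hc : c ≠ '0') (hc' : c' ≠ '0') :
    pvGo c l = pvGo c' l := by
  cases l with
  | nil => rfl
  | cons d rest => simp [pvGo_cons, hc, hc']

-- pvGo ignores the previous seat when the next seat is occupied
lemma pvGo_head_ne (p p' : Char) (l : List Char) (h : l.headD '0' ≠ '0') :
    pvGo p l = pvGo p' l := by
  cases l with
  | nil => simp at h
  | cons d rest =>
    simp only [List.headD_cons] at h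
    simp [pvGo_cons, h]

-- MAIN BRIDGE: the run-length spec equals the greedy pass, with the effective
-- previous seat determined by the parity of the current run length
lemma pvRuns_eq_pvGo (l : List Char) : ∀ (r : Nat),
    pvRuns l r = pvGo (if r % 2 = 1 then '0' else '1') l
      + ((if l.headD '0' = '0' then r / 2 else (r - 1) / 2 : Nat) : Int) := by
  induction l with
  | nil => intro r; simp [pvRuns, pvGo]
  | cons c rest ih =>
    intro r
    by_cases hc : c = '0'
    · subst hc
      have lhs : pvRuns ('0' :: rest) r = pvRuns rest (r + 1) := by simp [pvRuns]
      rw [lhs, ih (r + 1), pvGo_cons]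
      by_cases hh : rest.head?.getD '0' = '0' <;> by_cases hr : r % 2 = 1
      · have h2 : ¬ ((r + 1) % 2 = 1) := by omega
        have h3 : (r + 1) / 2 = r / 2 + 1 := by omega
        simp [List.headD_eq_head?_getD, hh, hr, h2, h3]
        ring
      · have h2 : (r + 1) % 2 = 1 := by omega
        have h3 : (r + 1) / 2 = r / 2 := by omega
        simp [List.headD_eq_head?_getD, hh, hr, h2, h3]
      · have h2 : ¬ ((r + 1) % 2 = 1) := by omega
        have h4 : pvGo '1' rest = pvGo '0' rest :=
          pvGo_head_ne '1' '0' rest (by simpa [List.headD_eq_head?_getD] using hh)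
        simp [List.headD_eq_head?_getD, hh, hr, h2, h4]
      · have h2 : (r + 1) % 2 = 1 := by omega
        simp [List.headD_eq_head?_getD, hh, hr, h2]
    · have lhs : pvRuns (c :: rest) r = (((r - 1) / 2 : Nat) : Int) + pvRuns rest 0 := by
        simp [pvRuns, hc]
      rw [lhs, ih 0, pvGo_cons]
      rw [pvGo_prev_ne c '1' rest hc (by decide)]
      by_cases hh : rest.head?.getD '0' = '0' <;>
        simp [List.headD_eq_head?_getD, hc, hh] <;> ring

-- B's fold computes the run-length spec
def pvStep (st : Int × Int) (c : Char) : Int × Int :=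
  if c = '0' then (st.1, st.2 + 1)
  else ((if st.2 ≠ 0 then st.1 + PySem.Int.floordiv (st.2 - 1) 2 else st.1), 0)

lemma pvFdiv_natCast (m : Nat) : PySem.Int.floordiv ((m : Nat) : Int) 2 = ((m / 2 : Nat) : Int) := by
  exact_mod_cast PySem.Int.floordiv_natCast m 2

lemma pvStep_zero (t : Int) (r : Nat) : pvStep (t, (r : Int)) '0' = (t, ((r + 1 : Nat) : Int)) := by
  simp [pvStep]

lemma pvStep_block (t : Int) (r : Nat) (c : Char) (hc : c ≠ '0') :
    pvStep (t, (r : Int)) c = (t + (((r - 1) / 2 : Nat) : Int), ((0 : Nat) : Int)) := by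
  by_cases hr : r = 0
  · subst hr; simp [pvStep, hc]
  · have h1 : (r : Int) - 1 = ((r - 1 : Nat) : Int) := by
      have : 1 ≤ r := Nat.one_le_iff_ne_zero.2 hr
      push_cast [this]; ring
    simp only [pvStep, if_neg hc, Prod.ext_iff]
    rw [if_pos (by exact_mod_cast hr), h1, pvFdiv_natCast]
    simp

lemma pvB_fold (l : List Char) : ∀ (t : Int) (r : Nat),
    ((l ++ ['0']).foldl pvStep (t, (r : Int))).1
      + PySem.Int.floordiv (((l ++ ['0']).foldl pvStep (t, (r : Int))).2 - 1) 2
      = t + pvRuns l r := by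
  induction l with
  | nil =>
    intro t r
    simp only [List.nil_append, List.foldl_cons, List.foldl_nil, pvStep_zero, pvRuns]
    have h1 : ((r + 1 : Nat) : Int) - 1 = ((r : Nat) : Int) := by push_cast; ring
    rw [h1, pvFdiv_natCast]
  | cons c rest ih =>
    intro t r
    by_cases hc : c = '0'
    · subst hc
      simp only [List.cons_append, List.foldl_cons, pvStep_zero]
      rw [ih t (r + 1)]
      simp [pvRuns]
    · simp only [List.cons_append, List.foldl_cons, pvStep_block t r c hc]
      rw [ih _ 0]
      simp only [pvRuns, if_neg hc]
      ring

-- B's port equals the run-length spec on the current free run = 1 (left pad)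
lemma pvB_eq (u : String) :
    free_urinals_alt u =
      if PySem.Chars.isIn ['1', '1'] u.toList then -1 else pvRuns u.toList 1 := by
  unfold free_urinals_alt
  by_cases h : PySem.Chars.isIn ['1', '1'] u.toList = true
  · rw [h]; simp
  · simp only [Bool.not_eq_true] at h
    rw [h]
    simp only [Bool.false_eq_true, if_false]
    have hfun : (fun (st : Int × Int) (c : Char) =>
        if c = '0' then (st.1, st.2 + 1)
        else ((if st.2 ≠ 0 then st.1 + PySem.Int.floordiv (st.2 - 1) 2 else st.1), 0)) = pvStep := rfl
    show ((u.toList ++ ['0']).foldl _ (0, 1)).1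
        + PySem.Int.floordiv (((u.toList ++ ['0']).foldl _ (0, 1)).2 - 1) 2 = pvRuns u.toList 1
    rw [hfun]
    have := pvB_fold u.toList 0 1
    rw [show ((1 : Nat) : Int) = (1 : Int) from rfl] at this
    rw [this]
    ring

-- A's slice-and-rebuild loop computes the greedy pass
lemma pvA_fold (suf : List Char) : ∀ (pre : List Char) (p : Char) (cnt : Int) (b : Int),
    b = (pre.length : Int) + 1 + suf.length →
    ((PySem.List.pyRange ((pre.length : Int) + 1) b 1).foldl
      (fun (st : List Char × Int) i =>
        if PySem.List.slice st.1 (some (i - 1)) (some (i + 2)) = ['0', '0', '0'] then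
          (PySem.List.slice st.1 none (some i) ++ ['1'] ++ PySem.List.slice st.1 (some (i + 1)) none,
           st.2 + 1)
        else st)
      (pre ++ p :: (suf ++ ['0']), cnt)).2 = cnt + pvGo p suf := by
  induction suf with
  | nil =>
    intro pre p cnt b hb
    have hb' : b ≤ (pre.length : Int) + 1 := by
      push_cast [List.length_nil] at hb; omega
    rw [PySem.List.pyRange_one_eq_nil hb']
    simp [pvGo]
  | cons c rest ih =>
    intro pre p cnt b hb
    rw [hb]
    rw [PySem.List.pyRange_one_cons (by push_cast [List.length_cons]; omega)]
    simp only [List.foldl_cons]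
    have hs : pre ++ p :: ((c :: rest) ++ ['0']) = pre ++ p :: c :: (rest ++ ['0']) := by simp
    have hslice : PySem.List.slice (pre ++ p :: c :: (rest ++ ['0']))
        (some ((pre.length : Int) + 1 - 1)) (some ((pre.length : Int) + 1 + 2))
        = [p, c, rest.headD '0'] := by
      have h1 : ((pre.length : Int) + 1 - 1) = ((pre.length : Nat) : Int) := by ring
      have h2 : ((pre.length : Int) + 1 + 2) = (((pre.length + 3 : Nat)) : Int) := by push_cast; ring
      rw [h1, h2, PySem.List.slice_natCast]
      rw [List.drop_left]
      have h3 : pre.length + 3 - pre.length = 3 := by omega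
      rw [h3]
      cases rest <;> simp
    rw [hs, hslice]
    by_cases hc : p = '0' ∧ c = '0' ∧ rest.headD '0' = '0'
    · have hcond : ([p, c, rest.headD '0'] = ['0', '0', '0']) := by
        obtain ⟨h1, h2, h3⟩ := hc; rw [h1, h2, h3]
      rw [if_pos hcond]
      have htake : PySem.List.slice (pre ++ p :: c :: (rest ++ ['0'])) none
          (some ((pre.length : Int) + 1)) = pre ++ [p] := by
        have h1 : ((pre.length : Int) + 1) = (((pre.length + 1 : Nat)) : Int) := by push_cast; ring
        rw [h1, PySem.List.slice_to_natCast]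
        rw [show pre ++ p :: c :: (rest ++ ['0']) = (pre ++ [p]) ++ (c :: (rest ++ ['0'])) by simp]
        rw [show pre.length + 1 = (pre ++ [p]).length by simp]
        exact List.take_left
      have hdrop : PySem.List.slice (pre ++ p :: c :: (rest ++ ['0']))
          (some ((pre.length : Int) + 1 + 1)) none = rest ++ ['0'] := by
        have h1 : ((pre.length : Int) + 1 + 1) = (((pre.length + 2 : Nat)) : Int) := by push_cast; ring
        rw [h1, PySem.List.slice_from_natCast]
        rw [show pre ++ p :: c :: (rest ++ ['0']) = (pre ++ [p, c]) ++ (rest ++ ['0']) by simp]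
        rw [show pre.length + 2 = (pre ++ [p, c]).length by simp]
        exact List.drop_left
      rw [htake, hdrop]
      have hre : (pre ++ [p]) ++ ['1'] ++ (rest ++ ['0']) = (pre ++ [p]) ++ '1' :: (rest ++ ['0']) := by
        simp
      have := ih (pre := pre ++ [p]) (p := '1') (cnt := cnt + 1)
        (b := ((pre.length : Int) + 1 + ((c :: rest).length : Int))) (by push_cast [List.length_append, List.length_cons, List.length_nil]; ring)
      rw [show ((pre ++ [p]).length : Int) + 1 = (pre.length : Int) + 1 + 1 by push_cast [List.length_append, List.length_cons, List.length_nil]; ring] at this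
      simp only [hre] at this ⊢
      rw [this, pvGo_cons, if_pos hc]
      ring
    · have hcond : ¬ ([p, c, rest.headD '0'] = ['0', '0', '0']) := by
        intro h; apply hc; simpa using h
      rw [if_neg hcond]
      have := ih (pre := pre ++ [p]) (p := c) (cnt := cnt)
        (b := ((pre.length : Int) + 1 + ((c :: rest).length : Int))) (by push_cast [List.length_append, List.length_cons, List.length_nil]; ring)
      rw [show ((pre ++ [p]).length : Int) + 1 = (pre.length : Int) + 1 + 1 by push_cast [List.length_append, List.length_cons, List.length_nil]; ring] at this
      rw [show (pre ++ [p]) ++ c :: (rest ++ ['0']) = pre ++ p :: c :: (rest ++ ['0']) by simp] at this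
      rw [this, pvGo_cons, if_neg hc]

-- ===== VERDICT (by name: the statement is the Claim_ definition above) =====
theorem free_urinals_spec : Claim_equal_free_urinals := by
  intro urinals _
  unfold Spec_free_urinals free_urinals
  rw [pvB_eq urinals]
  set l := urinals.toList with hl
  rw [pvIsIn_pad l]
  by_cases h : PySem.Chars.isIn ['1', '1'] l = true
  · rw [h]; simp
  · simp only [Bool.not_eq_true] at h
    rw [h]
    simp only [Bool.false_eq_true, if_false]
    have hA := pvA_fold l [] '0' 0 (((('0' :: l) ++ ['0']).length : Int) - 1)
      (by push_cast [List.length_append, List.length_cons, List.length_nil]; ring)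
    simp only [List.nil_append, List.length_nil, Nat.cast_zero, zero_add,
      List.cons_append] at hA
    rw [show ('0' :: l) ++ ['0'] = '0' :: (l ++ ['0']) from rfl]
    rw [hA, pvRuns_eq_pvGo l 1]
    by_cases hh : l.headD '0' = '0' <;> simp
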